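-- pv_equiv track=rewrite | github.com/lovelyCreator/evolai | remote_train.py | extract_sample
-- ===== SOURCE A (Python) =====
-- _INSTR_COLS = ("instruction", "input", "question", "prompt", "human")
--
-- _RESP_COLS  = ("response", "output", "answer", "completion", "assistant", "gpt")
--
-- def extract_sample(row: dict) -> dict | None:
--     keys = {k.lower(): k for k in row.keys()}
--     ik = next((keys[c] for c in _INSTR_COLS if c in keys), None)
--     rk = next((keys[c] for c in _RESP_COLS  if c in keys), None)
--     if ik and rk:
--         return {"instruction": str(row[ik]).strip(), "response": str(row[rk]).strip()}
--     for v in row.values():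
--         if isinstance(v, str) and v.strip():
--             return {"instruction": v.strip(), "response": ""}
--     return None
-- ===== SOURCE B (Python) =====
-- _INSTR_COLS = ("instruction", "input", "question", "prompt", "human")
--
-- _RESP_COLS  = ("response", "output", "answer", "completion", "assistant", "gpt")
--
--
-- def extract_sample(row: dict) -> dict | None:
--     # Single pass over the row: keep the best-ranked instruction and response
--     # candidates (rank = position in the column tuple) and the first usable
--     # fallback string, all in one traversal.
--     best_i = None          # (rank, value) with the smallest rank seen so far
--     best_r = None
--     fallback = None        # first non-blank string value
--     for k, v in row.items():
--         lk = k.lower()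
--         if lk in _INSTR_COLS:
--             p = _INSTR_COLS.index(lk)
--             if best_i is None or p < best_i[0]:
--                 best_i = (p, v)
--         if lk in _RESP_COLS:
--             p = _RESP_COLS.index(lk)
--             if best_r is None or p < best_r[0]:
--                 best_r = (p, v)
--         if fallback is None and isinstance(v, str) and v.strip():
--             fallback = v.strip()
--     if best_i is not None and best_r is not None:
--         return {"instruction": str(best_i[1]).strip(), "response": str(best_r[1]).strip()}
--     if fallback is not None:
--         return {"instruction": fallback, "response": ""}
--     return None
-- ===== Notes on version B (the rewrite author's own statement) =====
-- stated objective: alternative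
-- what changed: Replaces A's two-stage 'build a lowercase-key index dict, then probe it per column' with a single pass over row.items() that simultaneously accumulates the best-ranked instruction candidate, best-ranked response candidate (rank = position in the column tuple) and the first non-blank fallback value; Pre_ excludes rows in which two distinct keys share the same lowercase form, where A's dict-overwrite (last key wins) choice is accidental.
import Mathlib
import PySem

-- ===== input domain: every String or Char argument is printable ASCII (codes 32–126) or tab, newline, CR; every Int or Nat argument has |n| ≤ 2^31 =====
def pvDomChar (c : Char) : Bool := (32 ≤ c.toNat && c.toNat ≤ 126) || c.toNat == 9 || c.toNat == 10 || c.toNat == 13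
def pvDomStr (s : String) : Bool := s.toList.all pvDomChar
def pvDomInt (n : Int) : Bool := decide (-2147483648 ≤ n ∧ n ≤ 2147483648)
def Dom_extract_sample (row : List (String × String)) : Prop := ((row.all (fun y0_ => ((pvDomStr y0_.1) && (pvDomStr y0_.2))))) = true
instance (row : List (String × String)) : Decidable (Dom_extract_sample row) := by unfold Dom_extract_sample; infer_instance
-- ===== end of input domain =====

-- B replaces A's 'build a lowercase-key index, then probe it per column' with one
-- pass over row.items() accumulating the best-ranked candidates and the fallback.

def pvInstrCols : List String := ["instruction", "input", "question", "prompt", "human"]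

def pvRespCols : List String := ["response", "output", "answer", "completion", "assistant", "gpt"]

-- ===== PORT A =====
-- keys = {k.lower(): k for k in row.keys()}
def pvLowerIndex (ks : List String) : PySem.Dict String String :=
  ks.foldl (fun m k => m.insert (PySem.Str.lower k) k) PySem.Dict.empty

-- next((keys[c] for c in cols if c in keys), None)
def pvNextHit (keys : PySem.Dict String String) : List String → Option String
  | [] => none
  | c :: rest =>
    match keys.get? c with
    | some k => some k
    | none => pvNextHit keys rest

-- for v in row.values(): if isinstance(v, str) and v.strip(): return {...}  /  return None
def pvFallbackA : List String → Option (List (String × String))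
  | [] => none
  | v :: rest =>
    if PySem.Str.strip v ≠ "" then
      some [("instruction", PySem.Str.strip v), ("response", "")]
    else pvFallbackA rest

def extract_sample (row : List (String × String)) : Option (List (String × String)) :=
  let d := PySem.Dict.ofList row
  let keys := pvLowerIndex d.keys
  let ik := pvNextHit keys pvInstrCols
  let rk := pvNextHit keys pvRespCols
  match ik, rk with
  | some i, some r =>
    if i ≠ "" ∧ r ≠ "" then
      some [("instruction", PySem.Str.strip (d.getD i "")),
            ("response", PySem.Str.strip (d.getD r ""))]
    else pvFallbackA d.values
  | _, _ => pvFallbackA d.values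

-- ===== PORT B =====
-- loop body of B: update (best_i, best_r, fallback) with one item (k, v)
def pvStepB (st : Option (Nat × String) × Option (Nat × String) × Option String)
    (kv : String × String) :
    Option (Nat × String) × Option (Nat × String) × Option String :=
  let lk := PySem.Str.lower kv.1
  let bi := match PySem.List.index? pvInstrCols lk with
    | some p =>
      match st.1 with
      | none => some (p, kv.2)
      | some b => if p < b.1 then some (p, kv.2) else some b
    | none => st.1
  let br := match PySem.List.index? pvRespCols lk with
    | some p =>
      match st.2.1 with
      | none => some (p, kv.2)
      | some b => if p < b.1 then some (p, kv.2) else some b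
    | none => st.2.1
  let fb := match st.2.2 with
    | some f => some f
    | none => if PySem.Str.strip kv.2 ≠ "" then some (PySem.Str.strip kv.2) else none
  (bi, br, fb)

def extract_sample_alt (row : List (String × String)) : Option (List (String × String)) :=
  let d := PySem.Dict.ofList row
  let st := d.items.foldl pvStepB (none, none, none)
  match st.1 with
  | some bi =>
    match st.2.1 with
    | some br =>
      some [("instruction", PySem.Str.strip bi.2), ("response", PySem.Str.strip br.2)]
    | none =>
      match st.2.2 with
      | some f => some [("instruction", f), ("response", "")]
      | none => none
  | none =>
    match st.2.2 with
    | some f => some [("instruction", f), ("response", "")]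
    | none => none

-- ===== PRECONDITION & SPEC =====
-- Pre_ excludes rows in which two distinct keys share the same lowercase form: there
-- A's choice of key (last wins, via dict-comprehension overwrite) is accidental.
def Pre_extract_sample (row : List (String × String)) : Prop :=
  (((PySem.Dict.ofList row).keys.map PySem.Str.lower).Nodup)
instance (row : List (String × String)) : Decidable (Pre_extract_sample row) := by
  unfold Pre_extract_sample; infer_instance

def pvWitness_extract_sample : (List (String × String)) :=
  [("Instruction", " hi "), ("response", "ok")]

def Spec_extract_sample (row : List (String × String)) (out : Option (List (String × String))) : Prop := out = extract_sample_alt row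
instance (row : List (String × String)) (out : Option (List (String × String))) : Decidable (Spec_extract_sample row out) := by unfold Spec_extract_sample; infer_instance

-- ===== CLAIM (what is proved, stated in full; the proofs are below) =====
def Claim_equal_extract_sample : Prop := ∀ (row : List (String × String)), Dom_extract_sample row → Pre_extract_sample row → Spec_extract_sample row (extract_sample row)

-- ===== LEMMAS AND PROOFS =====

-- single-component steps of B's fold
def pvStepC (cols : List String) (b : Option (Nat × String)) (kv : String × String) :
    Option (Nat × String) :=
  match PySem.List.index? cols (PySem.Str.lower kv.1) with
  | some p =>
    match b with
    | none => some (p, kv.2)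
    | some q => if p < q.1 then some (p, kv.2) else some q
  | none => b

def pvStepF (f : Option String) (kv : String × String) : Option String :=
  match f with
  | some g => some g
  | none => if PySem.Str.strip kv.2 ≠ "" then some (PySem.Str.strip kv.2) else none

theorem pv_foldB_split (its : List (String × String))
    (a b : Option (Nat × String)) (c : Option String) :
    its.foldl pvStepB (a, b, c)
      = (its.foldl (pvStepC pvInstrCols) a, its.foldl (pvStepC pvRespCols) b,
         its.foldl pvStepF c) := by
  induction its generalizing a b c with
  | nil => rfl
  | cons kv its ih =>
    simp only [List.foldl_cons]
    rw [← ih]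
    rfl

-- merge of two candidates: smaller rank wins, the left one on ties
def pvMerge : Option (Nat × String) → Option (Nat × String) → Option (Nat × String)
  | none, r => r
  | some b, none => some b
  | some b, some r => if r.1 < b.1 then some r else some b

def pvHit (cols : List String) (kv : String × String) : Option (Nat × String) :=
  (PySem.List.index? cols (PySem.Str.lower kv.1)).map (fun p => (p, kv.2))

theorem pv_stepC_eq_merge (cols : List String) (b : Option (Nat × String))
    (kv : String × String) : pvStepC cols b kv = pvMerge b (pvHit cols kv) := by
  unfold pvStepC pvHit pvMerge
  cases PySem.List.index? cols (PySem.Str.lower kv.1) <;> cases b <;> simp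

theorem pv_merge_none_right (a : Option (Nat × String)) : pvMerge a none = a := by
  cases a <;> rfl

theorem pv_merge_none_left (a : Option (Nat × String)) : pvMerge none a = a := rfl

theorem pv_merge_assoc (a b c : Option (Nat × String)) :
    pvMerge (pvMerge a b) c = pvMerge a (pvMerge b c) := by
  rcases a with _ | ⟨pa, va⟩ <;> rcases b with _ | ⟨pb, vb⟩ <;> rcases c with _ | ⟨pc, vc⟩ <;>
    try rfl
  · by_cases h1 : pb < pa <;> simp [pvMerge, h1]
  · by_cases h1 : pb < pa <;> by_cases h2 : pc < pb <;> by_cases h3 : pc < pa <;>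
      simp [pvMerge, h1, h2, h3] <;> omega

theorem pv_foldC_merge (cols : List String) (its : List (String × String))
    (b : Option (Nat × String)) :
    its.foldl (pvStepC cols) b = pvMerge b (its.foldl (pvStepC cols) none) := by
  induction its generalizing b with
  | nil => simp [pv_merge_none_right]
  | cons kv its ih =>
    simp only [List.foldl_cons]
    rw [ih, ih (pvStepC cols none kv), pv_stepC_eq_merge, pv_stepC_eq_merge,
        pv_merge_assoc]
    rfl

-- first column having a case-insensitive match, with the first matching item
def pvFirstHit (cols : List String) (its : List (String × String)) :
    Option (String × String) :=
  match cols with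
  | [] => none
  | c :: cs =>
    match its.find? (fun kv => PySem.Str.lower kv.1 == c) with
    | some kv => some kv
    | none => pvFirstHit cs its

def pvShift (b : Nat × String) : Nat × String := (b.1 + 1, b.2)

theorem pv_merge_map_shift (a b : Option (Nat × String)) :
    pvMerge (a.map pvShift) (b.map pvShift) = (pvMerge a b).map pvShift := by
  rcases a with _ | ⟨pa, va⟩ <;> rcases b with _ | ⟨pb, vb⟩ <;> try rfl
  by_cases h : pb < pa
  · simp [pvMerge, pvShift, h]
  · simp [pvMerge, pvShift, h]

theorem pv_foldC_nil_cols (its : List (String × String)) :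
    its.foldl (pvStepC []) none = none := by
  induction its with
  | nil => rfl
  | cons kv its ih =>
    simp only [List.foldl_cons]
    rw [pv_foldC_merge]
    simp [pvStepC, PySem.List.index?, ih, pv_merge_none_right]

theorem pv_foldC_cons_cols (c : String) (cs : List String)
    (its : List (String × String)) :
    its.foldl (pvStepC (c :: cs)) none
      = (match its.find? (fun kv => PySem.Str.lower kv.1 == c) with
         | some kv => some (0, kv.2)
         | none => (its.foldl (pvStepC cs) none).map pvShift) := by
  induction its with
  | nil => rfl
  | cons kv its ih =>
    simp only [List.foldl_cons, List.find?_cons]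
    rw [pv_foldC_merge, pv_foldC_merge cs its (pvStepC cs none kv),
        pv_stepC_eq_merge, pv_stepC_eq_merge]
    by_cases h : PySem.Str.lower kv.1 = c
    · have hhit : pvHit (c :: cs) kv = some (0, kv.2) := by
        unfold pvHit
        rw [h, PySem.List.index?_cons_self]
        rfl
      simp only [h, beq_self_eq_true]
      rw [hhit]
      simp only [pvMerge]
      cases hx : its.foldl (pvStepC (c :: cs)) none with
      | none => rfl
      | some r => rfl
    · have hne : (PySem.Str.lower kv.1 == c) = false := by simp [h]
      have hhit : pvHit (c :: cs) kv = (pvHit cs kv).map pvShift := by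
        unfold pvHit
        rw [PySem.List.index?_cons_of_ne cs (fun hc => h hc.symm), Option.map_map,
            Option.map_map]
        rfl
      simp only [hne]
      rw [ih, hhit]
      cases hf : its.find? (fun kv => PySem.Str.lower kv.1 == c) with
      | some kv' =>
        cases hx : pvHit cs kv with
        | none => rfl
        | some b => simp [pvShift, pvMerge]
      | none =>
        rw [pv_merge_none_left, pv_merge_none_left, pv_merge_map_shift]

theorem pv_foldC_eq_firstHit (cols : List String) (its : List (String × String)) :
    (its.foldl (pvStepC cols) none).map Prod.snd
      = (pvFirstHit cols its).map Prod.snd := by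
  induction cols with
  | nil => simp [pv_foldC_nil_cols, pvFirstHit]
  | cons c cs ih =>
    rw [pv_foldC_cons_cols]
    unfold pvFirstHit
    cases hf : its.find? (fun kv => PySem.Str.lower kv.1 == c) with
    | some kv => simp
    | none =>
      simp only [Option.map_map]
      have hco : Prod.snd ∘ pvShift = (Prod.snd : Nat × String → String) :=
        funext (fun b => rfl)
      rw [hco, ih]

-- fallback: B's accumulated first non-blank value
def pvFbVal : List String → Option String
  | [] => none
  | v :: rest =>
    if PySem.Str.strip v ≠ "" then some (PySem.Str.strip v) else pvFbVal rest

theorem pv_foldF_some (its : List (String × String)) (f : String) :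
    its.foldl pvStepF (some f) = some f := by
  induction its with
  | nil => rfl
  | cons kv its ih => simpa [pvStepF] using ih

theorem pv_foldF_eq_fbVal (its : List (String × String)) :
    its.foldl pvStepF none = pvFbVal (its.map Prod.snd) := by
  induction its with
  | nil => rfl
  | cons kv its ih =>
    simp only [List.foldl_cons, List.map_cons]
    unfold pvFbVal
    by_cases h : PySem.Str.strip kv.2 = ""
    · simp [pvStepF, h, ih]
    · simp [pvStepF, h, pv_foldF_some]

theorem pv_fallbackA_eq (vs : List String) :
    pvFallbackA vs = (match pvFbVal vs with
      | some f => some [("instruction", f), ("response", "")]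
      | none => none) := by
  induction vs with
  | nil => rfl
  | cons v vs ih =>
    unfold pvFallbackA pvFbVal
    by_cases h : PySem.Str.strip v = "" <;> simp [h, ih]

-- A's index lookup is a last-match scan; under Nodup lowered keys it is find?
theorem pv_index_get_eq_scan (ks : List String) (c : String)
    (acc : PySem.Dict String String) :
    (ks.foldl (fun m k => m.insert (PySem.Str.lower k) k) acc).get? c
      = ks.foldl (fun f k => if PySem.Str.lower k = c then some k else f) (acc.get? c) := by
  induction ks generalizing acc with
  | nil => rfl
  | cons k rest ih =>
    simp only [List.foldl_cons, ih, PySem.Dict.get?_insert]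
    by_cases h : PySem.Str.lower k = c
    · simp [h]
    · have h' : ¬ c = PySem.Str.lower k := fun hc => h hc.symm
      simp [h, h']

theorem pv_scan_const (ks : List String) (c : String) (b : Option String)
    (h : ∀ k ∈ ks, PySem.Str.lower k ≠ c) :
    ks.foldl (fun f k => if PySem.Str.lower k = c then some k else f) b = b := by
  induction ks generalizing b with
  | nil => rfl
  | cons k rest ih =>
    simp only [List.foldl_cons]
    rw [if_neg (h k (by simp))]
    exact ih b (fun k' hk' => h k' (by simp [hk']))

theorem pv_scan_eq_find (ks : List String) (c : String)
    (hnd : (ks.map PySem.Str.lower).Nodup) :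
    ks.foldl (fun f k => if PySem.Str.lower k = c then some k else f) none
      = ks.find? (fun k => PySem.Str.lower k == c) := by
  induction ks with
  | nil => rfl
  | cons k rest ih =>
    simp only [List.map_cons, List.nodup_cons] at hnd
    simp only [List.foldl_cons, List.find?_cons]
    by_cases h : PySem.Str.lower k = c
    · have hnot : ∀ k' ∈ rest, PySem.Str.lower k' ≠ c := by
        intro k' hk' hc
        exact hnd.1 (List.mem_map.mpr ⟨k', hk', by rw [hc, h]⟩)
      simp only [h, beq_self_eq_true, if_pos]
      exact pv_scan_const rest c (some k) hnot
    · simp only [if_neg h]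
      have : (PySem.Str.lower k == c) = false := by simp [h]
      rw [this, ih hnd.2]

theorem pv_nextHit_eq_firstHit (d : PySem.Dict String String) (cols : List String)
    (hnd : (d.keys.map PySem.Str.lower).Nodup) :
    pvNextHit (pvLowerIndex d.keys) cols
      = (pvFirstHit cols d.items).map Prod.fst := by
  have hk : d.keys = d.items.map (fun p => p.1) := rfl
  induction cols with
  | nil => rfl
  | cons c cs ih =>
    unfold pvNextHit pvFirstHit
    have hg : (pvLowerIndex d.keys).get? c
        = (d.items.find? (fun kv => PySem.Str.lower kv.1 == c)).map (fun p => p.1) := by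
      unfold pvLowerIndex
      rw [pv_index_get_eq_scan, PySem.Dict.get?_empty, pv_scan_eq_find _ _ hnd, hk,
          List.find?_map]
      rfl
    rw [hg]
    cases hf : d.items.find? (fun kv => PySem.Str.lower kv.1 == c) with
    | some kv => simp
    | none => simp [ih]

-- properties of pvFirstHit: the hit is an item whose lowered key is a column name
theorem pv_firstHit_mem (cols : List String) (its : List (String × String))
    (kv : String × String) (h : pvFirstHit cols its = some kv) :
    kv ∈ its ∧ PySem.Str.lower kv.1 ∈ cols := by
  induction cols with
  | nil => simp [pvFirstHit] at h
  | cons c cs ih =>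
    unfold pvFirstHit at h
    cases hf : its.find? (fun kv => PySem.Str.lower kv.1 == c) with
    | some kv' =>
      rw [hf] at h
      cases h
      have hm := List.mem_of_find?_eq_some hf
      have hp := List.find?_some hf
      simp at hp
      exact ⟨hm, by simp [hp]⟩
    | none =>
      rw [hf] at h
      obtain ⟨h1, h2⟩ := ih h
      exact ⟨h1, by simp [h2]⟩

-- ===== VERDICT (by name: the statement is the Claim_ definition above) =====
theorem extract_sample_spec : Claim_equal_extract_sample := by
  intro row _ hpre
  unfold Spec_extract_sample extract_sample extract_sample_alt
  have hnd : (((PySem.Dict.ofList row).keys).map PySem.Str.lower).Nodup := hpre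
  have hknd : ((PySem.Dict.ofList row).keys).Nodup := PySem.Dict.nodup_keys_ofList row
  have hv : (PySem.Dict.ofList row).values
      = (PySem.Dict.ofList row).items.map Prod.snd := rfl
  simp only [pv_foldB_split]
  rw [pv_nextHit_eq_firstHit _ _ hnd, pv_nextHit_eq_firstHit _ _ hnd,
      pv_foldF_eq_fbVal, hv, pv_fallbackA_eq]
  cases hI : pvFirstHit pvInstrCols (PySem.Dict.ofList row).items with
  | none =>
    have hI' := pv_foldC_eq_firstHit pvInstrCols (PySem.Dict.ofList row).items
    rw [hI] at hI'
    simp only [Option.map_none] at hI'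
    rw [Option.map_eq_none_iff] at hI'
    simp [hI']
  | some kvI =>
    cases hR : pvFirstHit pvRespCols (PySem.Dict.ofList row).items with
    | none =>
      have hR' := pv_foldC_eq_firstHit pvRespCols (PySem.Dict.ofList row).items
      rw [hR] at hR'
      simp only [Option.map_none] at hR'
      rw [Option.map_eq_none_iff] at hR'
      have hI' := pv_foldC_eq_firstHit pvInstrCols (PySem.Dict.ofList row).items
      rw [hI] at hI'
      obtain ⟨bi, hbi, hbi2⟩ := Option.map_eq_some_iff.mp (hI'.trans (by rfl))
      simp [hbi, hR']
    | some kvR =>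
      obtain ⟨hImem, hIcol⟩ := pv_firstHit_mem _ _ _ hI
      obtain ⟨hRmem, hRcol⟩ := pv_firstHit_mem _ _ _ hR
      have hIne : kvI.1 ≠ "" := by
        intro h0
        rw [h0] at hIcol
        revert hIcol; decide
      have hRne : kvR.1 ≠ "" := by
        intro h0
        rw [h0] at hRcol
        revert hRcol; decide
      have hIget : (PySem.Dict.ofList row).getD kvI.1 "" = kvI.2 :=
        PySem.Dict.getD_of_mem_items (PySem.Dict.ofList row) (by exact hImem) hknd ""
      have hRget : (PySem.Dict.ofList row).getD kvR.1 "" = kvR.2 :=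
        PySem.Dict.getD_of_mem_items (PySem.Dict.ofList row) (by exact hRmem) hknd ""
      have hI' := pv_foldC_eq_firstHit pvInstrCols (PySem.Dict.ofList row).items
      rw [hI] at hI'
      obtain ⟨bi, hbi, hbi2⟩ := Option.map_eq_some_iff.mp hI'
      have hR' := pv_foldC_eq_firstHit pvRespCols (PySem.Dict.ofList row).items
      rw [hR] at hR'
      obtain ⟨br, hbr, hbr2⟩ := Option.map_eq_some_iff.mp hR'
      simp [hbi, hbr, hbi2, hbr2, hIne, hRne, hIget, hRget]
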